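-- pv_equiv track=rewrite | github.com/edemirkirkan/minimal-covers | minimal_covers.py | all_closures
-- ===== SOURCE A (Python) =====
-- def closure(R, FD, S):
--     '''
--     Check each functional dependency X -> Y on each iteration and add Y to the closure iff
--     X is a subset of the closure formed so far, repeat until there is no change in the set
--     '''
--     if not (is_subset(S, R)):
--         return []
--     result = list(S)
--     changed = True
--     while (changed):
--         changed = False
--         for fd in FD:
--             LHS = fd[0]
--             RHS = fd[1]
--             if (is_subset(LHS, result)):
--                 for att in RHS:
--                     if (att not in result):
--                         result.append(att)
--                         changed = True
--     return sorted(result)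
--
-- def all_closures(R, FD):
--     '''
--     Calculate closure of each attribute susbset of the schema unless the subset is superkey
--     but not candidate key. Check in each iteration if the attribute closure equals to R,
--     that is, check for candidate key, and if it is not minimal then just continue
--     with the next iteration instead of appending closure to the result set
--     '''
--     result = []
--     candidate_keys = []
--     for att_set in subsets(R):
--         att_closure = closure(R, FD, att_set)
--         if (att_closure == R):
--             is_super = False
--             for key in candidate_keys:
--                 if is_subset(key, att_set):
--                     is_super = True
--             if is_super:
--                 continue
--             candidate_keys.append(att_set)
--         result.append([att_set, att_closure])
--     return result
--
-- def is_subset(X, Y):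
--     '''
--     Check if the list is subset of another list
--     '''
--     return set(X).issubset(set(Y))
--
-- def subsets(R):
--     '''
--     Calculate all possible subsets of given list
--     Return them in a sorted way (first alphabetic and then length)
--     '''
--     x = len(R)
--     masks = [1 << i for i in range(x)]
--     result = []
--     for i in range(1, 1 << x):
--         r = []
--         for mask, ss in zip(masks, R):
--             if i & mask:
--                 r.append(ss)
--         result.append(r)
--     result.sort()
--     result.sort(key=len)
--     return result
-- ===== SOURCE B (Python) =====
-- def all_closures(R, FD):
--     if not R:
--         return []
--     # Subsets by iterative doubling (no bitmasks), closures by an LHS-indexed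
--     # worklist (each attribute processed once, triggering only the FDs that
--     # mention it) instead of A's rescan-all-FDs-until-no-change fixpoint, and
--     # the superkey filter keeps every previously seen superkey instead of only
--     # the kept candidate keys.
--     subs = [[]]
--     for a in R:
--         subs = subs + [s + [a] for s in subs]
--     subs = subs[1:]
--     subs.sort()
--     subs.sort(key=len)
--     # index: attribute -> the FDs whose LHS mentions it
--     occur = {}
--     for fd in FD:
--         for a in set(fd[0]):
--             occur.setdefault(a, []).append(fd)
--
--     def close(S):
--         C = set(S)
--         work = list(C)
--         for fd in FD:
--             if not fd[0]:
--                 for a in fd[1]: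
--                     if a not in C:
--                         C.add(a)
--                         work.append(a)
--         while work:
--             x = work.pop()
--             for fd in occur.get(x, ()):
--                 if C.issuperset(fd[0]):
--                     for a in fd[1]:
--                         if a not in C:
--                             C.add(a)
--                             work.append(a)
--         return C
--
--     result = []
--     superkeys = []
--     for s in subs:
--         base = set(s)
--         cur = close(s)
--         c = sorted(s + [a for a in cur if a not in base])
--         if c == R:
--             skip = any(t <= base for t in superkeys)
--             superkeys.append(base)
--             if skip:
--                 continue
--         result.append([s, c])
--     return result
-- ===== Notes on version B (the rewrite author's own statement) =====
-- stated objective: faster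
-- what changed: B computes each attribute closure with an LHS-indexed worklist (a dict from attribute to the FDs mentioning it; each attribute is popped once and triggers only those FDs) instead of A's rescan-all-FDs-until-no-change fixpoint, enumerates subsets by iterative list doubling instead of bitmask tests, and filters non-minimal superkeys against all previously seen superkeys instead of the kept candidate keys.
import Mathlib
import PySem

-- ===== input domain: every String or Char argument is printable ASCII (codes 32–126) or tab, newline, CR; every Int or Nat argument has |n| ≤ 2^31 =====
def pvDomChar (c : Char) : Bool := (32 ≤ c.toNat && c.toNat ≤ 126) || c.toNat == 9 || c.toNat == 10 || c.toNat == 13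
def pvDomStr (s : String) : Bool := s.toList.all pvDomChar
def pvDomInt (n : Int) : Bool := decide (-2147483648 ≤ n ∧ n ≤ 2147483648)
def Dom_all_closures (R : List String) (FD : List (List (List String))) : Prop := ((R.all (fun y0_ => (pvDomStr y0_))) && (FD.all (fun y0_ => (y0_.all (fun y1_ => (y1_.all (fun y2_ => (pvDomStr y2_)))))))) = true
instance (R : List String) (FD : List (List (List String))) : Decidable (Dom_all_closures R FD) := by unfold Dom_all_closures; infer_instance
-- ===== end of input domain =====

-- B replaces A's rescan-all-FDs-until-no-change closure by an LHS-indexed worklist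
-- (each attribute popped once, triggering only the FDs whose LHS mentions it),
-- enumerates the subsets by iterative list doubling instead of bitmask tests, and
-- filters non-minimal superkeys against all previously seen superkeys.

-- ===== PORT A =====
def is_subset (X Y : List String) : Bool :=
  PySem.Set.issubset (PySem.Set.ofList X) (PySem.Set.ofList Y)

-- one full pass of the 'for fd in FD' body over the state (result, changed)
def closurePass (FD : List (List (List String))) (st : List String × Bool) :
    List String × Bool :=
  FD.foldl (fun st fd =>
    if is_subset (PySem.List.pyGetD fd 0 []) st.1 then
      (PySem.List.pyGetD fd 1 []).foldl
        (fun st att => if st.1.contains att then st else (st.1 ++ [att], true)) st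
    else st) st

-- the 'while changed' loop; fuel is a bound under which the loop provably
-- stabilizes (each changing pass appends a fresh RHS attribute), proved below
def closureFuel (FD : List (List (List String))) : Nat :=
  (FD.map (fun fd => (PySem.List.pyGetD fd 1 []).length)).sum + 1

def closureLoop (FD : List (List (List String))) : Nat → List String → List String
  | 0, result => result
  | fuel+1, result =>
    let st := closurePass FD (result, false)
    if st.2 then closureLoop FD fuel st.1 else st.1

def closureA (R : List String) (FD : List (List (List String))) (S : List String) :
    List String :=
  if !(is_subset S R) then [] else
    PySem.List.sorted (closureLoop FD (closureFuel FD) S) (fun x => x) false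

def subsets (R : List String) : List (List String) :=
  let x := R.length
  let masks := (List.range x).map (fun i => (1 : Int) <<< (Int.ofNat i))
  let result := (PySem.List.pyRange 1 ((1 : Int) <<< (x : Int))).foldl
    (fun result i =>
      result ++ [((masks.zip R).foldl
        (fun r p => if PySem.Int.band i p.1 ≠ 0 then r ++ [p.2] else r) [])]) []
  PySem.List.sorted (PySem.List.sorted result (fun r => r) false) (fun r => r.length) false

def all_closures (R : List String) (FD : List (List (List String))) :
    List (List (List String)) :=
  ((subsets R).foldl
    (fun (acc : List (List (List String)) × List (List String)) att_set =>
      let att_closure := closureA R FD att_set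
      if att_closure = R then
        let is_super := acc.2.foldl (fun b key => if is_subset key att_set then true else b) false
        if is_super then acc
        else (acc.1 ++ [[att_set, att_closure]], acc.2 ++ [att_set])
      else (acc.1 ++ [[att_set, att_closure]], acc.2)) ([], [])).1

-- ===== PORT B =====
-- subsets by iterative doubling: subs = subs + [s + [a] for s in subs]
def altSubsAll (R : List String) : List (List String) :=
  R.foldl (fun subs a => subs ++ subs.map (fun s => s ++ [a])) [[]]

-- occur: attribute -> the FDs whose LHS mentions it
-- (for fd in FD: for a in set(fd[0]): occur.setdefault(a, []).append(fd))
def altOccur (FD : List (List (List String))) :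
    PySem.Dict String (List (List (List String))) :=
  FD.foldl (fun d fd =>
    (PySem.Set.ofList (PySem.List.pyGetD fd 0 [])).foldl
      (fun d a => d.modify a [] (fun l => l ++ [fd])) d) PySem.Dict.empty

-- for a in Y: if a not in C: C.add(a); work.append(a)
def altAddRHS (Y : List String) (st : PySem.Set String × List String) :
    PySem.Set String × List String :=
  Y.foldl (fun st a =>
    if PySem.Set.contains st.1 a then st
    else (PySem.Set.add st.1 a, st.2 ++ [a])) st

-- seed pass: for fd in FD: if not fd[0]: add the RHS
def altSeed (FD : List (List (List String))) (st : PySem.Set String × List String) :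
    PySem.Set String × List String :=
  FD.foldl (fun st fd =>
    if PySem.List.pyGetD fd 0 [] = [] then altAddRHS (PySem.List.pyGetD fd 1 []) st
    else st) st

-- one popped attribute x: for fd in occur.get(x, ()): if C >= fd[0]: add the RHS
def altPop (occ : PySem.Dict String (List (List (List String)))) (x : String)
    (st : PySem.Set String × List String) : PySem.Set String × List String :=
  (occ.getD x []).foldl (fun st fd =>
    if PySem.Set.issuperset st.1 (PySem.List.pyGetD fd 0 []) then
      altAddRHS (PySem.List.pyGetD fd 1 []) st
    else st) st

-- the 'while work' loop; fuel is a bound under which the worklist provably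
-- empties (every pop removes one entry and each insertion is a fresh RHS
-- attribute), proved below
def altFuel (FD : List (List (List String))) (S : List String) : Nat :=
  3 * (FD.map (fun fd => (PySem.List.pyGetD fd 1 []).length)).sum + S.length + 1

def altLoop (occ : PySem.Dict String (List (List (List String)))) :
    Nat → PySem.Set String × List String → PySem.Set String
  | 0, st => st.1
  | fuel+1, st =>
    match PySem.List.pop? st.2 with
    | none => st.1
    | some (x, rest) => altLoop occ fuel (altPop occ x (st.1, rest))

def altClose (FD : List (List (List String)))
    (occ : PySem.Dict String (List (List (List String)))) (S : List String) :
    PySem.Set String :=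
  altLoop occ (altFuel FD S) (altSeed FD (PySem.Set.ofList S, S))

def all_closures_alt (R : List String) (FD : List (List (List String))) :
    List (List (List String)) :=
  if R = [] then [] else
  let subs := PySem.List.sorted (PySem.List.sorted
      (PySem.List.slice (altSubsAll R) (some 1) none) (fun r => r) false)
    (fun r => r.length) false
  let occ := altOccur FD
  (subs.foldl
    (fun (acc : List (List (List String)) × List (PySem.Set String)) s =>
      let base := PySem.Set.ofList s
      let cur := altClose FD occ s
      -- sorted(s + [a for a in cur if a not in base]): the sorted result does
      -- not depend on the iteration order of the set cur
      let c := PySem.List.sorted (s ++ PySem.Set.diff cur base) (fun x => x) false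
      if c = R then
        let skip := acc.2.any (fun t => PySem.Set.issubset t base)
        if skip then (acc.1, acc.2 ++ [base])
        else (acc.1 ++ [[s, c]], acc.2 ++ [base])
      else (acc.1 ++ [[s, c]], acc.2)) ([], [])).1

-- ===== PRECONDITION & SPEC =====
-- When R is nonempty, A evaluates fd[0] and fd[1] for every fd, so an FD entry of
-- length < 2 makes A raise IndexError; Pre_ excludes exactly those inputs.
def Pre_all_closures (R : List String) (FD : List (List (List String))) : Prop :=
  R = [] ∨ ∀ fd ∈ FD, 2 ≤ fd.length
instance (R : List String) (FD : List (List (List String))) :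
    Decidable (Pre_all_closures R FD) := by unfold Pre_all_closures; infer_instance

def pvWitness_all_closures : List String × List (List (List String)) :=
  (["A", "B"], [[["A"], ["B"]]])

def Spec_all_closures (R : List String) (FD : List (List (List String)))
    (out : List (List (List String))) : Prop := out = all_closures_alt R FD
instance (R : List String) (FD : List (List (List String)))
    (out : List (List (List String))) : Decidable (Spec_all_closures R FD out) := by
  unfold Spec_all_closures; infer_instance

-- ===== CLAIM (what is proved, stated in full; the proofs are below) =====
def Claim_equal_all_closures : Prop := ∀ (R : List String) (FD : List (List (List String))), Dom_all_closures R FD → Pre_all_closures R FD → Spec_all_closures R FD (all_closures R FD)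

-- ===== LEMMAS AND PROOFS =====
-- (everything below is proof-side only)

-- proof-side abbreviations for the two components of a functional dependency
def LHSf (fd : List (List String)) : List String := PySem.List.pyGetD fd 0 []
def RHSf (fd : List (List String)) : List String := PySem.List.pyGetD fd 1 []

-- a predicate closed under all functional dependencies
def ClosedP (FD : List (List (List String))) (T : String → Prop) : Prop :=
  ∀ fd ∈ FD, (∀ x ∈ LHSf fd, T x) → ∀ a ∈ RHSf fd, T a

-- all attributes occurring on a right-hand side
def UList (FD : List (List (List String))) : List String := FD.flatMap RHSf

-- number of RHS attributes not yet in l (termination measure of both loops)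
def meas (FD : List (List (List String))) (l : List String) : Nat :=
  (PySem.Set.ofList (UList FD)).countP (fun a => !(l.contains a))

theorem is_subset_iff (X Y : List String) : is_subset X Y = true ↔ ∀ x ∈ X, x ∈ Y := by
  simp [is_subset, PySem.Set.issubset_iff, PySem.Set.mem_ofList]

theorem countP_lt_of_witness (s : List String) (p q : String → Bool)
    (h : ∀ x, q x = true → p x = true) (a : String) (ha : a ∈ s)
    (hpa : p a = true) (hqa : q a = false) : s.countP q < s.countP p := by
  induction s with
  | nil => cases ha
  | cons x t ih =>
    simp only [List.countP_cons]
    have h2 : (if q x = true then 1 else 0) ≤ (if p x = true then 1 else 0) := by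
      by_cases hq : q x = true
      · simp [hq, h x hq]
      · simp [hq]
    rcases List.mem_cons.mp ha with rfl | hat
    · have hle : t.countP q ≤ t.countP p := List.countP_mono_left (fun x hx hq => h x hq)
      have e1 : (if q a = true then 1 else 0) = 0 := by simp [hqa]
      have e2 : (if p a = true then 1 else 0) = 1 := by simp [hpa]
      omega
    · have := ih hat
      omega

theorem meas_lt (FD : List (List (List String))) (l l' : List String)
    (hsub : ∀ x ∈ l, x ∈ l') (a : String) (ha : a ∈ UList FD)
    (hal : a ∉ l) (hal' : a ∈ l') : meas FD l' < meas FD l := by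
  unfold meas
  refine countP_lt_of_witness _ _ _ (fun x hx => ?_) a ((PySem.Set.mem_ofList _ _).mpr ha) ?_ ?_
  · have hx' : x ∉ l' := by simpa using hx
    have hxl : x ∉ l := fun hm => hx' (hsub x hm)
    simpa using hxl
  · simpa using hal
  · simpa using hal'

theorem UList_length (FD : List (List (List String))) :
    (UList FD).length = (FD.map (fun fd => (PySem.List.pyGetD fd 1 []).length)).sum := by
  simp [UList, RHSf, List.length_flatMap]

theorem meas_le_sum (FD : List (List (List String))) (l : List String) :
    meas FD l ≤ (FD.map (fun fd => (PySem.List.pyGetD fd 1 []).length)).sum := by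
  have h1 : meas FD l ≤ (PySem.Set.ofList (UList FD)).length := List.countP_le_length
  have h2 : (PySem.Set.ofList (UList FD)).length ≤ (UList FD).length :=
    PySem.Set.length_ofList_le _
  have h3 := UList_length FD
  omega

theorem meas_lt_fuel (FD : List (List (List String))) (l : List String) :
    meas FD l < closureFuel FD := by
  have := meas_le_sum FD l
  unfold closureFuel
  omega

theorem UList_cons (fd : List (List String)) (FDs : List (List (List String))) :
    UList (fd :: FDs) = RHSf fd ++ UList FDs := by
  simp [UList]

theorem inner_spec (RHS : List String) : ∀ st : List String × Bool,
    ∃ d, (RHS.foldl (fun st att => if st.1.contains att then st else (st.1 ++ [att], true)) st).1 = st.1 ++ d ∧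
      d.Nodup ∧ (∀ x ∈ d, x ∉ st.1 ∧ x ∈ RHS) ∧ (∀ a ∈ RHS, a ∈ st.1 ++ d) ∧
      (RHS.foldl (fun st att => if st.1.contains att then st else (st.1 ++ [att], true)) st).2 = (st.2 || !d.isEmpty) := by
  induction RHS with
  | nil =>
    intro st
    exact ⟨[], by simp, by simp, by simp, by simp, by simp⟩
  | cons a l ih =>
    intro st
    simp only [List.foldl_cons]
    by_cases hmem : st.1.contains a = true
    · have ha' : a ∈ st.1 := List.contains_iff_mem.mp hmem
      rw [if_pos hmem]
      obtain ⟨d, h1, h2, h3, h4, h5⟩ := ih st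
      refine ⟨d, h1, h2, ?_, ?_, h5⟩
      · exact fun x hx => ⟨(h3 x hx).1, List.mem_cons_of_mem _ (h3 x hx).2⟩
      · intro b hb
        rcases List.mem_cons.mp hb with rfl | hbl
        · exact List.mem_append_left _ ha'
        · exact h4 b hbl
    · have ha' : a ∉ st.1 := fun hm => hmem (List.contains_iff_mem.mpr hm)
      rw [if_neg hmem]
      obtain ⟨d, h1, h2, h3, h4, h5⟩ := ih (st.1 ++ [a], true)
      have hassoc : (st.1 ++ [a]) ++ d = st.1 ++ (a :: d) := by simp
      refine ⟨a :: d, ?_, ?_, ?_, ?_, ?_⟩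
      · rw [h1]; exact hassoc
      · refine List.nodup_cons.mpr ⟨?_, h2⟩
        intro had
        exact (h3 a had).1 (by simp)
      · intro x hx
        rcases List.mem_cons.mp hx with rfl | hxd
        · exact ⟨ha', by simp⟩
        · exact ⟨fun hm => (h3 x hxd).1 (List.mem_append_left _ hm),
            List.mem_cons_of_mem _ (h3 x hxd).2⟩
      · intro b hb
        rcases List.mem_cons.mp hb with rfl | hbl
        · exact List.mem_append_right _ (List.mem_cons_self)
        · rw [← hassoc]; exact h4 b hbl
      · rw [h5]; simp

theorem pass_spec (FD : List (List (List String))) : ∀ st : List String × Bool,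
    ∃ d, (closurePass FD st).1 = st.1 ++ d ∧ d.Nodup ∧
      (∀ x ∈ d, x ∉ st.1 ∧ x ∈ UList FD) ∧
      (closurePass FD st).2 = (st.2 || !d.isEmpty) ∧
      (d = [] → ∀ fd ∈ FD, (∀ x ∈ LHSf fd, x ∈ st.1) → ∀ a ∈ RHSf fd, a ∈ st.1) ∧
      (∀ T : String → Prop, ClosedP FD T → (∀ x ∈ st.1, T x) → ∀ x ∈ d, T x) := by
  induction FD with
  | nil =>
    intro st
    refine ⟨[], by simp [closurePass], by simp, by simp, by simp [closurePass], ?_, by simp⟩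
    intro _ fd hfd
    cases hfd
  | cons fd FDs ih =>
    intro st
    by_cases hs : is_subset (PySem.List.pyGetD fd 0 []) st.1 = true
    · obtain ⟨d1, i1, i2, i3, i4, i5⟩ := inner_spec (PySem.List.pyGetD fd 1 []) st
      obtain ⟨d2, j1, j2, j3, j4, j5, j6⟩ := ih
        ((PySem.List.pyGetD fd 1 []).foldl
          (fun st att => if st.1.contains att then st else (st.1 ++ [att], true)) st)
      have key : closurePass (fd :: FDs) st = closurePass FDs
          ((PySem.List.pyGetD fd 1 []).foldl
            (fun st att => if st.1.contains att then st else (st.1 ++ [att], true)) st) := by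
        simp only [closurePass, List.foldl_cons, if_pos hs]
      have hLT : ∀ (T : String → Prop), (∀ x ∈ st.1, T x) → ∀ x ∈ LHSf fd, T x := by
        intro T hst y hy
        exact hst y ((is_subset_iff _ _).mp hs y hy)
      have hd1T : ∀ (T : String → Prop), ClosedP (fd :: FDs) T → (∀ x ∈ st.1, T x) →
          ∀ x ∈ d1, T x := by
        intro T hT hst x hx
        exact hT fd List.mem_cons_self (hLT T hst) x (i3 x hx).2
      refine ⟨d1 ++ d2, ?_, ?_, ?_, ?_, ?_, ?_⟩
      · rw [key, j1, i1, List.append_assoc]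
      · refine i2.append j2 ?_
        intro x hx1 hx2
        exact (j3 x hx2).1 (by rw [i1]; exact List.mem_append_right _ hx1)
      · intro x hx
        rcases List.mem_append.mp hx with hx1 | hx2
        · exact ⟨(i3 x hx1).1, by rw [UList_cons]; exact List.mem_append_left _ (i3 x hx1).2⟩
        · exact ⟨fun hm => (j3 x hx2).1 (by rw [i1]; exact List.mem_append_left _ hm),
            by rw [UList_cons]; exact List.mem_append_right _ (j3 x hx2).2⟩
      · have hbool : ∀ (b : Bool) (l1 l2 : List String),
            ((b || !l1.isEmpty) || !l2.isEmpty) = (b || !(l1 ++ l2).isEmpty) := by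
          intro b l1 l2
          cases l1 <;> cases l2 <;> cases b <;> simp
        rw [key, j4, i5, hbool]
      · intro hnil
        rcases List.append_eq_nil_iff.mp hnil with ⟨hn1, hn2⟩
        have hst1 : ((PySem.List.pyGetD fd 1 []).foldl
            (fun st att => if st.1.contains att then st else (st.1 ++ [att], true)) st).1
            = st.1 := by rw [i1, hn1, List.append_nil]
        intro fd' hfd' hL
        rcases List.mem_cons.mp hfd' with rfl | hfd's
        · intro a hA
          have := i4 a hA
          rw [hn1, List.append_nil] at this
          exact this
        · intro a hA
          have := j5 hn2 fd' hfd's (by rw [hst1]; exact hL) a hA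
          rw [hst1] at this
          exact this
      · intro T hT hst x hx
        rcases List.mem_append.mp hx with hx1 | hx2
        · exact hd1T T hT hst x hx1
        · refine j6 T (fun fd' h' => hT fd' (List.mem_cons_of_mem _ h')) ?_ x hx2
          intro y hy
          rw [i1] at hy
          rcases List.mem_append.mp hy with hy1 | hy2
          · exact hst y hy1
          · exact hd1T T hT hst y hy2
    · obtain ⟨d, j1, j2, j3, j4, j5, j6⟩ := ih st
      have key : closurePass (fd :: FDs) st = closurePass FDs st := by
        simp only [closurePass, List.foldl_cons, if_neg hs]
      refine ⟨d, by rw [key, j1], j2, ?_, by rw [key, j4], ?_, ?_⟩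
      · intro x hx
        exact ⟨(j3 x hx).1, by rw [UList_cons]; exact List.mem_append_right _ (j3 x hx).2⟩
      · intro hnil fd' hfd' hL
        rcases List.mem_cons.mp hfd' with rfl | hfd's
        · exact absurd ((is_subset_iff _ _).mpr hL) hs
        · exact j5 hnil fd' hfd's hL
      · intro T hT hst x hx
        exact j6 T (fun fd' h' => hT fd' (List.mem_cons_of_mem _ h')) hst x hx

theorem loop_spec (FD : List (List (List String))) : ∀ (fuel : Nat) (res : List String),
    meas FD res < fuel →
    ∃ e, closureLoop FD fuel res = res ++ e ∧ e.Nodup ∧ (∀ x ∈ e, x ∉ res) ∧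
      (∀ fd ∈ FD, (∀ x ∈ LHSf fd, x ∈ res ++ e) → ∀ a ∈ RHSf fd, a ∈ res ++ e) ∧
      (∀ T : String → Prop, ClosedP FD T → (∀ x ∈ res, T x) → ∀ x ∈ e, T x) := by
  intro fuel
  induction fuel with
  | zero => intro res h; omega
  | succ fuel ih =>
    intro res h
    obtain ⟨d, p1, p2, p3, p4, p5, p6⟩ := pass_spec FD (res, false)
    cases hd : d with
    | nil =>
      rw [hd] at p1 p4
      have h2 : (closurePass FD (res, false)).2 = false := by rw [p4]; simp
      have h1 : (closurePass FD (res, false)).1 = res := by rw [p1, List.append_nil]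
      refine ⟨[], ?_, by simp, by simp, ?_, by simp⟩
      · simp only [closureLoop, h2, if_false, Bool.false_eq_true]
        rw [h1, List.append_nil]
      · simp only [List.append_nil]
        exact p5 hd
    | cons y d' =>
      have h2 : (closurePass FD (res, false)).2 = true := by rw [p4, hd]; simp
      have hylt : meas FD (closurePass FD (res, false)).1 < meas FD res := by
        refine meas_lt FD res _ (fun x hx => by rw [p1]; exact List.mem_append_left _ hx)
          y ((p3 y (by rw [hd]; simp)).2) ((p3 y (by rw [hd]; simp)).1) ?_
        rw [p1, hd]
        exact List.mem_append_right _ List.mem_cons_self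
      obtain ⟨e', q1, q2, q3, q4, q5⟩ := ih (closurePass FD (res, false)).1 (by omega)
      have hd1T : ∀ (T : String → Prop), ClosedP FD T → (∀ x ∈ res, T x) →
          ∀ x ∈ d, T x := fun T hT hres => p6 T hT hres
      refine ⟨d ++ e', ?_, ?_, ?_, ?_, ?_⟩
      · simp only [closureLoop, h2, if_true]
        rw [q1, p1, List.append_assoc]
      · refine p2.append q2 ?_
        intro x hx1 hx2
        exact q3 x hx2 (by rw [p1]; exact List.mem_append_right _ hx1)
      · intro x hx
        rcases List.mem_append.mp hx with hx1 | hx2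
        · exact (p3 x hx1).1
        · exact fun hm => q3 x hx2 (by rw [p1]; exact List.mem_append_left _ hm)
      · have := q4
        rw [p1, List.append_assoc] at this
        exact this
      · intro T hT hres x hx
        rcases List.mem_append.mp hx with hx1 | hx2
        · exact hd1T T hT hres x hx1
        · refine q5 T hT ?_ x hx2
          intro z hz
          rw [p1] at hz
          rcases List.mem_append.mp hz with hz1 | hz2
          · exact hres z hz1
          · exact hd1T T hT hres z hz2

-- the attribute subset selected from R by the bits of i (A's zip-mask body,
-- B's doubling both produce lists of these)
def selB (R : List String) (i : Int) : List String :=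
  (PySem.List.enumerate R).filterMap
    (fun p => if PySem.Int.band i ((1 : Int) <<< p.1) ≠ 0 then some p.2 else none)

theorem enumerate_snd_mem (R : List String) : ∀ (k : Int) (p : Int × String),
    p ∈ PySem.List.enumerate R k → p.2 ∈ R := by
  induction R with
  | nil =>
    intro k p hp
    simp [PySem.List.enumerate] at hp
  | cons a t ih =>
    intro k p hp
    rw [show PySem.List.enumerate (a :: t) k = (k, a) :: PySem.List.enumerate t (k + 1) from rfl] at hp
    rcases List.mem_cons.mp hp with rfl | h
    · exact List.mem_cons_self
    · exact List.mem_cons_of_mem _ (ih (k + 1) p h)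

theorem maskzip_eq (i : Int) (R : List String) : ∀ (k : Nat) (acc : List String),
    ((((List.range' k R.length).map (fun j => (1 : Int) <<< (Int.ofNat j))).zip R).foldl
      (fun r p => if PySem.Int.band i p.1 ≠ 0 then r ++ [p.2] else r) acc)
    = acc ++ (PySem.List.enumerate R (k : Int)).filterMap
        (fun p => if PySem.Int.band i ((1 : Int) <<< p.1) ≠ 0 then some p.2 else none) := by
  induction R with
  | nil => intro k acc; simp [PySem.List.enumerate]
  | cons a t ih =>
    intro k acc
    have h1 : List.range' k (a :: t).length = k :: List.range' (k + 1) t.length := by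
      simp [List.range'_succ]
    rw [h1]
    have hcast : Int.ofNat k = (k : Int) := rfl
    simp only [List.map_cons, List.zip_cons_cons, List.foldl_cons, hcast]
    rw [show PySem.List.enumerate (a :: t) (k : Int)
        = ((k : Int), a) :: PySem.List.enumerate t ((k : Int) + 1) from rfl]
    have h4 : ((k : Int) + 1) = ((k + 1 : Nat) : Int) := by push_cast; ring
    by_cases hc : PySem.Int.band i ((1 : Int) <<< (k : Int)) ≠ 0
    · rw [if_pos hc, h4, ih (k + 1) (acc ++ [a])]
      have hfm : List.filterMap
          (fun p : Int × String => if PySem.Int.band i ((1 : Int) <<< p.1) ≠ 0 then some p.2 else none)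
          (((k : Int), a) :: PySem.List.enumerate t ((k + 1 : Nat) : Int))
          = a :: List.filterMap
            (fun p : Int × String => if PySem.Int.band i ((1 : Int) <<< p.1) ≠ 0 then some p.2 else none)
            (PySem.List.enumerate t ((k + 1 : Nat) : Int)) := by
        rw [List.filterMap_cons]
        simp [hc]
      rw [hfm]
      simp
    · rw [if_neg hc, h4, ih (k + 1) acc]
      have hfm : List.filterMap
          (fun p : Int × String => if PySem.Int.band i ((1 : Int) <<< p.1) ≠ 0 then some p.2 else none)
          (((k : Int), a) :: PySem.List.enumerate t ((k + 1 : Nat) : Int))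
          = List.filterMap
            (fun p : Int × String => if PySem.Int.band i ((1 : Int) <<< p.1) ≠ 0 then some p.2 else none)
            (PySem.List.enumerate t ((k + 1 : Nat) : Int)) := by
        rw [List.filterMap_cons]
        simp [hc]
      rw [hfm]

theorem subs_eq (R : List String) : subsets R =
    PySem.List.sorted (PySem.List.sorted
      ((PySem.List.pyRange 1 ((1 : Int) <<< (R.length : Int))).map (fun i => selB R i))
      (fun r => r) false) (fun r => r.length) false := by
  have hlist : ((PySem.List.pyRange 1 ((1 : Int) <<< (R.length : Int))).foldl
      (fun result i => result ++ [((((List.range R.length).map (fun j => (1 : Int) <<< (Int.ofNat j))).zip R).foldl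
        (fun r p => if PySem.Int.band i p.1 ≠ 0 then r ++ [p.2] else r) [])]) [])
    = (PySem.List.pyRange 1 ((1 : Int) <<< (R.length : Int))).map (fun i => selB R i) := by
    rw [PySem.List.foldl_append_singleton_eq_map, List.nil_append]
    apply List.map_congr_left
    intro i _
    have h := maskzip_eq i R 0 []
    rw [List.range_eq_range']
    simpa [selB] using h
  show PySem.List.sorted (PySem.List.sorted
      ((PySem.List.pyRange 1 ((1 : Int) <<< (R.length : Int))).foldl
        (fun result i => result ++ [((((List.range R.length).map (fun j => (1 : Int) <<< (Int.ofNat j))).zip R).foldl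
          (fun r p => if PySem.Int.band i p.1 ≠ 0 then r ++ [p.2] else r) [])]) [])
      (fun r => r) false) (fun r => r.length) false = _
  rw [hlist]

theorem subs_elem_mem (R : List String) (s : List String) (hs : s ∈ subsets R) :
    ∀ x ∈ s, x ∈ R := by
  rw [subs_eq, PySem.List.mem_sorted, PySem.List.mem_sorted] at hs
  obtain ⟨i, -, rfl⟩ := List.mem_map.mp hs
  intro x hx
  obtain ⟨p, hp, hpx⟩ := List.mem_filterMap.mp hx
  by_cases hc : PySem.Int.band i ((1 : Int) <<< p.1) ≠ 0
  · rw [if_pos hc] at hpx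
    cases hpx
    exact enumerate_snd_mem R 0 p hp
  · rw [if_neg hc] at hpx
    cases hpx

-- ===== bit arithmetic for the doubling/bitmask correspondence =====

theorem one_shl_natCast (k : Nat) : (1 : Int) <<< ((k : Nat) : Int) = ((2 ^ k : Nat) : Int) := by
  show ((Nat.shiftLeft' false 1 k : Nat) : Int) = _
  rw [Nat.shiftLeft'_false, Nat.shiftLeft_eq, one_mul]

theorem band_one_shl (i : Int) (k : Nat) (hi : 0 ≤ i) :
    (PySem.Int.band i ((1 : Int) <<< ((k : Nat) : Int)) ≠ 0) ↔ i.toNat.testBit k := by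
  rw [one_shl_natCast]
  conv_lhs => rw [show i = ((i.toNat : Nat) : Int) from (Int.toNat_of_nonneg hi).symm]
  rw [PySem.Int.band_natCast, Nat.and_two_pow]
  have h2 : (2 : Nat) ^ k ≠ 0 := by positivity
  cases h : i.toNat.testBit k <;> simp [h, h2]

theorem selB_congr_bits (R : List String) (i j : Int) (hi : 0 ≤ i) (hj : 0 ≤ j)
    (h : ∀ k < R.length, i.toNat.testBit k = j.toNat.testBit k) : selB R i = selB R j := by
  unfold selB
  apply List.filterMap_congr
  intro p hp
  obtain ⟨k, hk, rfl⟩ := (PySem.List.mem_enumerate_iff _ _ _).mp hp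
  have e1 : (0 : Int) + (k : Int) = ((k : Nat) : Int) := by push_cast; ring
  simp only [e1]
  have hb1 := band_one_shl i k hi
  have hb2 := band_one_shl j k hj
  rw [h k hk] at hb1
  by_cases hc : j.toNat.testBit k
  · rw [if_pos (hb1.mpr hc), if_pos (hb2.mpr hc)]
  · rw [if_neg (fun hne => hc (hb1.mp hne)), if_neg (fun hne => hc (hb2.mp hne))]

theorem selB_append (R : List String) (a : String) (i : Int) :
    selB (R ++ [a]) i = selB R i ++
      (if PySem.Int.band i ((1 : Int) <<< ((R.length : Nat) : Int)) ≠ 0 then [a] else []) := by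
  unfold selB
  rw [PySem.List.enumerate_append, List.filterMap_append]
  congr 1
  have e1 : (0 : Int) + (R.length : Int) = ((R.length : Nat) : Int) := by push_cast; ring
  rw [show PySem.List.enumerate [a] ((0 : Int) + (R.length : Int))
      = [((0 : Int) + (R.length : Int), a)] from rfl]
  rw [List.filterMap_cons]
  simp only [e1]
  by_cases hc : PySem.Int.band i ((1 : Int) <<< ((R.length : Nat) : Int)) ≠ 0
  · simp [hc]
  · simp [hc]

theorem doubling_eq (R : List String) :
    (PySem.List.pyRange 0 ((1 : Int) <<< ((R.length : Nat) : Int))).map (fun i => selB R i)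
      = altSubsAll R := by
  induction R using List.reverseRecOn with
  | nil => rfl
  | append_singleton R a ih =>
    rw [one_shl_natCast] at ih ⊢
    have hlen : ((R ++ [a]).length : Nat) = R.length + 1 := by simp
    rw [hlen]
    have hsplit : PySem.List.pyRange 0 ((2 ^ (R.length + 1) : Nat) : Int)
        = PySem.List.pyRange 0 ((2 ^ R.length : Nat) : Int)
          ++ PySem.List.pyRange ((2 ^ R.length : Nat) : Int) ((2 ^ (R.length + 1) : Nat) : Int) := by
      refine PySem.List.pyRange_one_append 0 _ _ (by positivity) ?_
      have : (2 : Nat) ^ R.length ≤ 2 ^ (R.length + 1) := Nat.pow_le_pow_right (by omega) (by omega)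
      exact_mod_cast this
    rw [hsplit, List.map_append]
    have hstep : altSubsAll (R ++ [a])
        = altSubsAll R ++ (altSubsAll R).map (fun s => s ++ [a]) := by
      unfold altSubsAll
      rw [List.foldl_append]
      rfl
    rw [hstep]
    congr 1
    · -- low half: the high bit is 0
      rw [← ih]
      apply List.map_congr_left
      intro i hi
      obtain ⟨hi0, hi2⟩ := PySem.List.mem_pyRange_one.mp hi
      rw [selB_append]
      have hlt : i.toNat < 2 ^ R.length := by
        have h2 : (i.toNat : Int) < ((2 ^ R.length : Nat) : Int) := by
          rw [Int.toNat_of_nonneg hi0]; exact hi2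
        exact_mod_cast h2
      have hbit : i.toNat.testBit R.length = false := Nat.testBit_lt_two_pow hlt
      have hcond : ¬ (PySem.Int.band i ((1 : Int) <<< ((R.length : Nat) : Int)) ≠ 0) := by
        intro hne
        have h := (band_one_shl i R.length hi0).mp hne
        rw [hbit] at h
        exact Bool.false_ne_true h
      rw [if_neg hcond, List.append_nil]
    · -- high half: the high bit is 1, low bits unchanged
      rw [← ih, List.map_map]
      rw [PySem.List.pyRange_one, PySem.List.pyRange_one, List.map_map, List.map_map]
      have hcnt : (((2 ^ (R.length + 1) : Nat) : Int) - ((2 ^ R.length : Nat) : Int)).toNat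
          = 2 ^ R.length := by
        have h1 : (2 : Nat) ^ (R.length + 1) = 2 ^ R.length + 2 ^ R.length := by ring
        have h2 : ((2 ^ (R.length + 1) : Nat) : Int) - ((2 ^ R.length : Nat) : Int)
            = ((2 ^ R.length : Nat) : Int) := by rw [h1]; push_cast; ring
        rw [h2, Int.toNat_natCast]
      have hcnt0 : (((2 ^ R.length : Nat) : Int) - 0).toNat = 2 ^ R.length := by
        rw [sub_zero, Int.toNat_natCast]
      rw [hcnt, hcnt0]
      apply List.map_congr_left
      intro k hk
      have hk2 : k < 2 ^ R.length := List.mem_range.mp hk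
      show selB (R ++ [a]) (((2 ^ R.length : Nat) : Int) + (k : Int))
          = selB R (0 + (k : Int)) ++ [a]
      have hik : ((2 ^ R.length : Nat) : Int) + (k : Int) = ((2 ^ R.length + k : Nat) : Int) := by
        push_cast; ring
      have hk0 : (0 : Int) + (k : Int) = ((k : Nat) : Int) := by push_cast; ring
      rw [hik, hk0, selB_append]
      have htn : (((2 ^ R.length + k : Nat) : Int)).toNat = 2 ^ R.length + k :=
        Int.toNat_natCast _
      have hbit : ((2 ^ R.length + k : Nat)).testBit R.length = true := by
        rw [Nat.testBit_two_pow_add_eq, Nat.testBit_lt_two_pow hk2]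
        rfl
      have hcond : PySem.Int.band ((2 ^ R.length + k : Nat) : Int)
          ((1 : Int) <<< ((R.length : Nat) : Int)) ≠ 0 := by
        rw [band_one_shl _ R.length (by positivity)]
        rw [htn, hbit]
      rw [if_pos hcond]
      congr 1
      refine selB_congr_bits R _ _ (by positivity) (by positivity) ?_
      intro j hj
      rw [htn, Int.toNat_natCast]
      exact Nat.testBit_two_pow_add_gt hj k

theorem subsB_eq (R : List String) :
    PySem.List.slice (altSubsAll R) (some 1) none
      = (PySem.List.pyRange 1 ((1 : Int) <<< (R.length : Int))).map (fun i => selB R i) := by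
  rw [PySem.List.slice_from_one, ← doubling_eq]
  have hpos : (0 : Int) < ((2 ^ R.length : Nat) : Int) := by positivity
  rw [one_shl_natCast] at *
  rw [PySem.List.pyRange_one_cons hpos]
  rfl

-- ===== the LHS-indexed worklist closure (port B) =====

theorem mem_occ (FD : List (List (List String))) (x : String) (fd' : List (List String)) :
    fd' ∈ (altOccur FD).getD x [] ↔ fd' ∈ FD ∧ x ∈ LHSf fd' := by
  have hflat : ∀ (d : PySem.Dict String (List (List (List String)))),
      FD.foldl (fun d fd =>
        (PySem.Set.ofList (PySem.List.pyGetD fd 0 [])).foldl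
          (fun d a => d.modify a [] (fun l => l ++ [fd])) d) d
      = (FD.flatMap (fun fd =>
          (PySem.Set.ofList (PySem.List.pyGetD fd 0 [])).map (fun a => (a, fd)))).foldl
          (fun d p => d.modify p.1 [] (fun l => l ++ [p.2])) d := by
    intro d
    rw [List.foldl_flatMap]
    simp only [List.foldl_map]
  unfold altOccur
  rw [hflat, PySem.Dict.getD_foldl_modify_append]
  simp only [PySem.Dict.getD_empty, List.nil_append]
  constructor
  · intro h
    obtain ⟨p, hpmem, rfl⟩ := List.mem_map.mp h
    have hfil := List.mem_filter.mp hpmem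
    obtain ⟨fd, hfd, hpf⟩ := List.mem_flatMap.mp hfil.1
    obtain ⟨a, ha, rfl⟩ := List.mem_map.mp hpf
    have hax : a = x := by simpa using hfil.2
    subst hax
    exact ⟨hfd, by simpa [LHSf] using (PySem.Set.mem_ofList _ _).mp ha⟩
  · rintro ⟨hfd, hx⟩
    apply List.mem_map.mpr
    refine ⟨(x, fd'), List.mem_filter.mpr ⟨List.mem_flatMap.mpr ⟨fd', hfd, ?_⟩, by simp⟩, rfl⟩
    exact List.mem_map.mpr ⟨x, (PySem.Set.mem_ofList _ _).mpr (by simpa [LHSf] using hx), rfl⟩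

theorem addRHS_spec (Y : List String) : ∀ (st : PySem.Set String × List String),
    ∃ d, altAddRHS Y st = (st.1 ++ d, st.2 ++ d) ∧ d.Nodup ∧
      (∀ a ∈ d, a ∉ st.1 ∧ a ∈ Y) ∧ (∀ a ∈ Y, a ∈ st.1 ++ d) := by
  induction Y with
  | nil => intro st; exact ⟨[], by simp [altAddRHS], by simp, by simp, by simp⟩
  | cons a Y ih =>
    intro st
    rw [show altAddRHS (a :: Y) st
        = altAddRHS Y (if PySem.Set.contains st.1 a then st
            else (PySem.Set.add st.1 a, st.2 ++ [a])) from rfl]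
    by_cases hmem : a ∈ st.1
    · have hct : PySem.Set.contains st.1 a = true := by
        rw [PySem.Set.contains_iff]; exact hmem
      rw [if_pos hct]
      obtain ⟨d, h1, h2, h3, h4⟩ := ih st
      refine ⟨d, h1, h2,
        fun b hb => ⟨(h3 b hb).1, List.mem_cons_of_mem _ (h3 b hb).2⟩, ?_⟩
      intro b hb
      rcases List.mem_cons.mp hb with rfl | hbY
      · exact List.mem_append_left _ hmem
      · exact h4 b hbY
    · have hc : ¬ (PySem.Set.contains st.1 a = true) := by
        rw [PySem.Set.contains_iff]; exact hmem
      rw [if_neg hc]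
      obtain ⟨d, h1, h2, h3, h4⟩ := ih (PySem.Set.add st.1 a, st.2 ++ [a])
      rw [PySem.Set.add_of_not_mem hmem] at h1 h3 h4 ⊢
      have hassoc : ∀ l : List String, (l ++ [a]) ++ d = l ++ (a :: d) := by
        intro l; simp
      refine ⟨a :: d, ?_, ?_, ?_, ?_⟩
      · rw [h1]; simp only [hassoc]
      · refine List.nodup_cons.mpr ⟨fun had => (h3 a had).1 (by simp), h2⟩
      · intro b hb
        rcases List.mem_cons.mp hb with rfl | hbd
        · exact ⟨hmem, List.mem_cons_self⟩
        · exact ⟨fun hm => (h3 b hbd).1 (List.mem_append_left _ hm),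
            List.mem_cons_of_mem _ (h3 b hbd).2⟩
      · intro b hb
        rcases List.mem_cons.mp hb with rfl | hbY
        · rw [← hassoc]
          exact List.mem_append_left _ (List.mem_append_right _ List.mem_cons_self)
        · rw [← hassoc]; exact h4 b hbY

theorem popFold_spec (fds : List (List (List String))) :
    ∀ (st : PySem.Set String × List String),
    ∃ d, (fds.foldl (fun st fd =>
        if PySem.Set.issuperset st.1 (PySem.List.pyGetD fd 0 []) then
          altAddRHS (PySem.List.pyGetD fd 1 []) st
        else st) st) = (st.1 ++ d, st.2 ++ d) ∧ d.Nodup ∧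
      (∀ a ∈ d, a ∉ st.1 ∧ ∃ fd ∈ fds, a ∈ RHSf fd) ∧
      (∀ fd ∈ fds, (∀ y ∈ LHSf fd, y ∈ st.1) → ∀ a ∈ RHSf fd, a ∈ st.1 ++ d) ∧
      (∀ T : String → Prop, (∀ fd ∈ fds, (∀ y ∈ LHSf fd, T y) → ∀ a ∈ RHSf fd, T a) →
        (∀ x ∈ st.1, T x) → ∀ x ∈ d, T x) := by
  induction fds with
  | nil =>
    intro st
    exact ⟨[], by simp, by simp, by simp, by simp, by simp⟩
  | cons fd fds ih =>
    intro st
    simp only [List.foldl_cons]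
    by_cases hs : PySem.Set.issuperset st.1 (PySem.List.pyGetD fd 0 []) = true
    · rw [if_pos hs]
      obtain ⟨d1, i1, i2, i3, i4⟩ := addRHS_spec (PySem.List.pyGetD fd 1 []) st
      obtain ⟨d2, j1, j2, j3, j4, j5⟩ := ih (altAddRHS (PySem.List.pyGetD fd 1 []) st)
      rw [i1] at j1 j3 j4 j5
      have hLsub : ∀ y ∈ LHSf fd, y ∈ st.1 := by
        intro y hy
        exact (PySem.Set.issuperset_iff _ _).mp hs y (by simpa [LHSf] using hy)
      have hd1T : ∀ (T : String → Prop),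
          (∀ fd' ∈ fd :: fds, (∀ y ∈ LHSf fd', T y) → ∀ a ∈ RHSf fd', T a) →
          (∀ x ∈ st.1, T x) → ∀ x ∈ d1, T x := by
        intro T hT hst x hx
        exact hT fd List.mem_cons_self (fun y hy => hst y (hLsub y hy)) x
          (by simpa [RHSf] using (i3 x hx).2)
      refine ⟨d1 ++ d2, ?_, ?_, ?_, ?_, ?_⟩
      · rw [i1, j1]; simp
      · refine i2.append j2 ?_
        intro x hx1 hx2
        exact (j3 x hx2).1 (List.mem_append_right _ hx1)
      · intro a ha
        rcases List.mem_append.mp ha with ha1 | ha2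
        · exact ⟨(i3 a ha1).1, fd, List.mem_cons_self, by simpa [RHSf] using (i3 a ha1).2⟩
        · obtain ⟨fd', hfd', hr⟩ := (j3 a ha2).2
          exact ⟨fun hm => (j3 a ha2).1 (List.mem_append_left _ hm),
            fd', List.mem_cons_of_mem _ hfd', hr⟩
      · intro fd' hfd' hL
        rcases List.mem_cons.mp hfd' with rfl | hfd's
        · intro a ha
          have := i4 a (by simpa [RHSf] using ha)
          rcases List.mem_append.mp this with h1 | h2
          · exact List.mem_append_left _ h1
          · exact List.mem_append_right _ (List.mem_append_left _ h2)
        · intro a ha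
          have := j4 fd' hfd's (fun y hy => List.mem_append_left _ (hL y hy)) a ha
          simpa [List.append_assoc] using this
      · intro T hT hst x hx
        rcases List.mem_append.mp hx with hx1 | hx2
        · exact hd1T T hT hst x hx1
        · refine j5 T (fun fd' h' => hT fd' (List.mem_cons_of_mem _ h')) ?_ x hx2
          intro y hy
          rcases List.mem_append.mp hy with hy1 | hy2
          · exact hst y hy1
          · exact hd1T T hT hst y hy2
    · rw [if_neg hs]
      obtain ⟨d, j1, j2, j3, j4, j5⟩ := ih st
      refine ⟨d, j1, j2, ?_, ?_, ?_⟩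
      · intro a ha
        obtain ⟨fd', hfd', hr⟩ := (j3 a ha).2
        exact ⟨(j3 a ha).1, fd', List.mem_cons_of_mem _ hfd', hr⟩
      · intro fd' hfd' hL
        rcases List.mem_cons.mp hfd' with rfl | hfd's
        · exfalso
          apply hs
          exact (PySem.Set.issuperset_iff _ _).mpr (fun y hy => hL y (by simpa [LHSf] using hy))
        · exact j4 fd' hfd's hL
      · intro T hT hst x hx
        exact j5 T (fun fd' h' => hT fd' (List.mem_cons_of_mem _ h')) hst x hx

theorem seed_spec (FD : List (List (List String))) :
    ∀ (st : PySem.Set String × List String),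
    ∃ d, altSeed FD st = (st.1 ++ d, st.2 ++ d) ∧ d.Nodup ∧
      (∀ a ∈ d, a ∉ st.1 ∧ a ∈ UList FD) ∧
      (∀ fd ∈ FD, LHSf fd = [] → ∀ a ∈ RHSf fd, a ∈ st.1 ++ d) ∧
      (∀ T : String → Prop, ClosedP FD T → (∀ x ∈ st.1, T x) → ∀ x ∈ d, T x) := by
  unfold altSeed
  induction FD with
  | nil =>
    intro st
    exact ⟨[], by simp, by simp, by simp, by simp, by simp⟩
  | cons fd fds ih =>
    intro st
    simp only [List.foldl_cons]
    by_cases hs : PySem.List.pyGetD fd 0 [] = []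
    · rw [if_pos hs]
      obtain ⟨d1, i1, i2, i3, i4⟩ := addRHS_spec (PySem.List.pyGetD fd 1 []) st
      obtain ⟨d2, j1, j2, j3, j4, j5⟩ := ih (altAddRHS (PySem.List.pyGetD fd 1 []) st)
      rw [i1] at j1 j3 j4 j5
      have hd1T : ∀ (T : String → Prop), ClosedP (fd :: fds) T →
          (∀ x ∈ st.1, T x) → ∀ x ∈ d1, T x := by
        intro T hT hst x hx
        refine hT fd List.mem_cons_self ?_ x (by simpa [RHSf] using (i3 x hx).2)
        intro y hy
        rw [show LHSf fd = PySem.List.pyGetD fd 0 [] from rfl, hs] at hy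
        cases hy
      refine ⟨d1 ++ d2, ?_, ?_, ?_, ?_, ?_⟩
      · rw [i1, j1]; simp
      · refine i2.append j2 ?_
        intro x hx1 hx2
        exact (j3 x hx2).1 (List.mem_append_right _ hx1)
      · intro a ha
        rcases List.mem_append.mp ha with ha1 | ha2
        · refine ⟨(i3 a ha1).1, ?_⟩
          rw [UList_cons]
          exact List.mem_append_left _ (by simpa [RHSf] using (i3 a ha1).2)
        · refine ⟨fun hm => (j3 a ha2).1 (List.mem_append_left _ hm), ?_⟩
          rw [UList_cons]
          exact List.mem_append_right _ (j3 a ha2).2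
      · intro fd' hfd' hnil
        rcases List.mem_cons.mp hfd' with rfl | hfd's
        · intro a ha
          have := i4 a (by simpa [RHSf] using ha)
          rcases List.mem_append.mp this with h1 | h2
          · exact List.mem_append_left _ h1
          · exact List.mem_append_right _ (List.mem_append_left _ h2)
        · intro a ha
          have := j4 fd' hfd's hnil a ha
          simpa [List.append_assoc] using this
      · intro T hT hst x hx
        rcases List.mem_append.mp hx with hx1 | hx2
        · exact hd1T T hT hst x hx1
        · refine j5 T (fun fd' h' => hT fd' (List.mem_cons_of_mem _ h')) ?_ x hx2
          intro y hy
          rcases List.mem_append.mp hy with hy1 | hy2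
          · exact hst y hy1
          · exact hd1T T hT hst y hy2
    · rw [if_neg hs]
      obtain ⟨d, j1, j2, j3, j4, j5⟩ := ih st
      refine ⟨d, j1, j2, ?_, ?_, ?_⟩
      · intro a ha
        refine ⟨(j3 a ha).1, ?_⟩
        rw [UList_cons]
        exact List.mem_append_right _ (j3 a ha).2
      · intro fd' hfd' hnil
        rcases List.mem_cons.mp hfd' with rfl | hfd's
        · exact absurd hnil hs
        · exact j4 fd' hfd's hnil
      · intro T hT hst x hx
        exact j5 T (fun fd' h' => hT fd' (List.mem_cons_of_mem _ h')) hst x hx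

theorem countP_split (u C d : List String) (hdC : ∀ a ∈ d, a ∉ C) :
    u.countP (fun a => !((C ++ d).contains a)) + u.countP (fun a => d.contains a)
      = u.countP (fun a => !(C.contains a)) := by
  induction u with
  | nil => simp
  | cons a t ih =>
    simp only [List.countP_cons]
    have key : (if (!((C ++ d).contains a)) = true then 1 else 0)
        + (if d.contains a = true then 1 else 0)
        = (if (!(C.contains a)) = true then 1 else 0) := by
      by_cases h1 : a ∈ C
      · have h2 : a ∉ d := fun hd => hdC a hd h1
        simp [List.contains_iff_mem, List.mem_append, h1, h2]
      · by_cases h2 : a ∈ d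
        · simp [List.contains_iff_mem, List.mem_append, h1, h2]
        · simp [List.contains_iff_mem, List.mem_append, h1, h2]
    omega

theorem countP_mem_eq_length (u d : List String) (hu : u.Nodup) (hd : d.Nodup)
    (hsub : ∀ a ∈ d, a ∈ u) : u.countP (fun a => d.contains a) = d.length := by
  rw [List.countP_eq_length_filter]
  have hperm : (u.filter (fun a => d.contains a)).Perm d := by
    refine (List.perm_ext_iff_of_nodup (hu.filter _) hd).mpr ?_
    intro x
    simp only [List.mem_filter, List.contains_iff_mem]
    constructor
    · rintro ⟨-, hx⟩; exact hx
    · intro hx; exact ⟨hsub x hx, hx⟩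
  exact hperm.length_eq

theorem meas_append (FD : List (List (List String))) (C d : List String)
    (hd : d.Nodup) (hdU : ∀ a ∈ d, a ∈ UList FD) (hdC : ∀ a ∈ d, a ∉ C) :
    meas FD (C ++ d) + d.length = meas FD C := by
  unfold meas
  have h1 := countP_split (PySem.Set.ofList (UList FD)) C d hdC
  have h2 := countP_mem_eq_length (PySem.Set.ofList (UList FD)) d
    (PySem.Set.nodup_ofList _) hd (fun a ha => (PySem.Set.mem_ofList _ _).mpr (hdU a ha))
  omega

theorem nodup_length_le (d u : List String) (hd : d.Nodup) (hsub : ∀ a ∈ d, a ∈ u) :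
    d.length ≤ u.length :=
  (hd.subperm hsub).length_le

theorem altLoop_spec (FD : List (List (List String))) :
    ∀ (fuel : Nat) (C : PySem.Set String) (work : List String),
    C.Nodup → (∀ x ∈ work, x ∈ C) →
    (∀ fd ∈ FD, (∀ y ∈ LHSf fd, y ∈ C ∧ y ∉ work) → ∀ a ∈ RHSf fd, a ∈ C) →
    2 * meas FD C + work.length < fuel →
    (∀ x ∈ C, x ∈ altLoop (altOccur FD) fuel (C, work)) ∧
    (altLoop (altOccur FD) fuel (C, work)).Nodup ∧
    (∀ fd ∈ FD, (∀ y ∈ LHSf fd, y ∈ altLoop (altOccur FD) fuel (C, work)) →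
      ∀ a ∈ RHSf fd, a ∈ altLoop (altOccur FD) fuel (C, work)) ∧
    (∀ T : String → Prop, ClosedP FD T → (∀ x ∈ C, T x) →
      ∀ x ∈ altLoop (altOccur FD) fuel (C, work), T x) := by
  intro fuel
  induction fuel with
  | zero => intro C work _ _ _ h; omega
  | succ fuel ih =>
    intro C work hnd hwC hinv h
    rcases List.eq_nil_or_concat work with rfl | ⟨rest, x, rfl⟩
    · have hres : altLoop (altOccur FD) (fuel + 1) (C, []) = C := by
        simp [altLoop, PySem.List.pop?]
      rw [hres]
      refine ⟨fun x hx => hx, hnd, ?_, fun T _ hc x hx => hc x hx⟩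
      intro fd hfd hL
      exact hinv fd hfd (fun y hy => ⟨hL y hy, by simp⟩)
    · simp only [List.concat_eq_append] at hwC hinv h ⊢
      have hres : altLoop (altOccur FD) (fuel + 1) (C, rest ++ [x])
          = altLoop (altOccur FD) fuel (altPop (altOccur FD) x (C, rest)) := by
        simp only [altLoop, PySem.List.pop?_last]
      obtain ⟨d, p1, p2, p3, p4, p5⟩ := popFold_spec ((altOccur FD).getD x []) (C, rest)
      have hpop : altPop (altOccur FD) x (C, rest) = (C ++ d, rest ++ d) := p1
      have hdU : ∀ a ∈ d, a ∈ UList FD := by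
        intro a ha
        obtain ⟨fd, hfd, hr⟩ := (p3 a ha).2
        have hfdFD : fd ∈ FD := ((mem_occ FD x fd).mp hfd).1
        exact List.mem_flatMap.mpr ⟨fd, hfdFD, hr⟩
      have hdC : ∀ a ∈ d, a ∉ C := fun a ha => (p3 a ha).1
      have hmeas := meas_append FD C d p2 hdU hdC
      have hworkC : ∀ y ∈ rest ++ d, y ∈ C ++ d := by
        intro y hy
        rcases List.mem_append.mp hy with h1 | h2
        · exact List.mem_append_left _ (hwC y (List.mem_append_left _ h1))
        · exact List.mem_append_right _ h2
      have hinv' : ∀ fd ∈ FD, (∀ y ∈ LHSf fd, y ∈ C ++ d ∧ y ∉ rest ++ d) →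
          ∀ a ∈ RHSf fd, a ∈ C ++ d := by
        intro fd hfd hL
        have hLC : ∀ y ∈ LHSf fd, y ∈ C := by
          intro y hy
          rcases List.mem_append.mp (hL y hy).1 with h1 | h2
          · exact h1
          · exact absurd (List.mem_append_right rest h2) (hL y hy).2
        by_cases hx : x ∈ LHSf fd
        · have hocc : fd ∈ (altOccur FD).getD x [] := (mem_occ FD x fd).mpr ⟨hfd, hx⟩
          exact p4 fd hocc hLC
        · have : ∀ a ∈ RHSf fd, a ∈ C := by
            refine hinv fd hfd ?_
            intro y hy
            refine ⟨hLC y hy, ?_⟩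
            intro hyw
            rcases List.mem_append.mp hyw with h1 | h2
            · exact (hL y hy).2 (List.mem_append_left _ h1)
            · rw [List.mem_singleton] at h2
              subst h2
              exact hx hy
          exact fun a ha => List.mem_append_left _ (this a ha)
      have hnd' : (C ++ d).Nodup := by
        refine hnd.append p2 ?_
        intro a ha1 ha2
        exact (p3 a ha2).1 ha1
      have hfuel' : 2 * meas FD (C ++ d) + (rest ++ d).length < fuel := by
        have hlen : (rest ++ [x]).length = rest.length + 1 := by simp
        have hlen2 : (rest ++ d).length = rest.length + d.length := by simp
        omega
      obtain ⟨q1, q2, q3, q4⟩ := ih (C ++ d) (rest ++ d) hnd' hworkC hinv' hfuel'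
      rw [hres, hpop]
      refine ⟨?_, q2, q3, ?_⟩
      · intro y hy
        exact q1 y (List.mem_append_left _ hy)
      · intro T hT hC y hy
        have hCd : ∀ z ∈ C ++ d, T z := by
          intro z hz
          rcases List.mem_append.mp hz with h1 | h2
          · exact hC z h1
          · refine p5 T ?_ hC z h2
            intro fd hfd hLT a ha
            exact hT fd ((mem_occ FD x fd).mp hfd).1 (fun y' hy' => hLT y' hy') a ha
        exact q4 T hT hCd y hy

-- the whole worklist closure computes A's closure (as the same sorted list)
theorem closureB_eq (R : List String) (FD : List (List (List String))) (S : List String)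
    (hS : ∀ x ∈ S, x ∈ R) :
    closureA R FD S = PySem.List.sorted
      (S ++ PySem.Set.diff (altClose FD (altOccur FD) S) (PySem.Set.ofList S))
      (fun x => x) false := by
  have hguard : is_subset S R = true := (is_subset_iff _ _).mpr hS
  unfold closureA
  rw [if_neg (by simp [hguard] : ¬ ((!is_subset S R) = true))]
  obtain ⟨e, a1, a2, a3, a4, a5⟩ := loop_spec FD (closureFuel FD) S (meas_lt_fuel FD S)
  rw [a1]
  -- the B side
  obtain ⟨d0, s1, s2, s3, s4, s5⟩ := seed_spec FD (PySem.Set.ofList S, S)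
  have hC0nd : (PySem.Set.ofList S ++ d0).Nodup := by
    refine (PySem.Set.nodup_ofList _).append s2 ?_
    intro a ha1 ha2
    exact (s3 a ha2).1 ha1
  have hwC : ∀ y ∈ S ++ d0, y ∈ PySem.Set.ofList S ++ d0 := by
    intro y hy
    rcases List.mem_append.mp hy with h1 | h2
    · exact List.mem_append_left _ ((PySem.Set.mem_ofList _ _).mpr h1)
    · exact List.mem_append_right _ h2
  have hinv : ∀ fd ∈ FD, (∀ y ∈ LHSf fd, y ∈ PySem.Set.ofList S ++ d0 ∧ y ∉ S ++ d0) →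
      ∀ a ∈ RHSf fd, a ∈ PySem.Set.ofList S ++ d0 := by
    intro fd hfd hL
    have hnil : LHSf fd = [] := by
      cases hLf : LHSf fd with
      | nil => rfl
      | cons y ys =>
        exfalso
        have hy := hL y (by rw [hLf]; exact List.mem_cons_self)
        rcases List.mem_append.mp hy.1 with h1 | h2
        · exact hy.2 (List.mem_append_left _ ((PySem.Set.mem_ofList _ _).mp h1))
        · exact hy.2 (List.mem_append_right _ h2)
    exact s4 fd hfd hnil
  have hfuel : 2 * meas FD (PySem.Set.ofList S ++ d0) + (S ++ d0).length
      < altFuel FD S := by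
    have h1 := meas_le_sum FD (PySem.Set.ofList S ++ d0)
    have h2 : d0.length ≤ (FD.map (fun fd => (PySem.List.pyGetD fd 1 []).length)).sum := by
      have := nodup_length_le d0 (UList FD) s2 (fun a ha => (s3 a ha).2)
      have h3 := UList_length FD
      omega
    have h4 : (S ++ d0).length = S.length + d0.length := by simp
    unfold altFuel
    omega
  have hclose : altClose FD (altOccur FD) S
      = altLoop (altOccur FD) (altFuel FD S) (PySem.Set.ofList S ++ d0, S ++ d0) := by
    unfold altClose
    rw [s1]
  obtain ⟨q1, q2, q3, q4⟩ :=
    altLoop_spec FD (altFuel FD S) (PySem.Set.ofList S ++ d0) (S ++ d0) hC0nd hwC hinv hfuel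
  rw [hclose]
  set C' := altLoop (altOccur FD) (altFuel FD S) (PySem.Set.ofList S ++ d0, S ++ d0) with hC'
  have hSC' : ∀ y ∈ S, y ∈ C' := by
    intro y hy
    exact q1 y (List.mem_append_left _ ((PySem.Set.mem_ofList _ _).mpr hy))
  have hsound : ∀ (T : String → Prop), ClosedP FD T → (∀ y ∈ S, T y) → ∀ y ∈ C', T y := by
    intro T hT hST
    refine q4 T hT ?_
    intro z hz
    rcases List.mem_append.mp hz with h1 | h2
    · exact hST z ((PySem.Set.mem_ofList _ _).mp h1)
    · exact s5 T hT (fun w hw => hST w ((PySem.Set.mem_ofList _ _).mp hw)) z h2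
  have hresF : ∀ y ∈ S ++ e, y ∈ C' := by
    intro y hy
    rcases List.mem_append.mp hy with h1 | h2
    · exact hSC' y h1
    · exact a5 (fun z => z ∈ C') (fun fd hfd hL => q3 fd hfd hL) hSC' y h2
  have hFres : ∀ y ∈ C', y ∈ S ++ e := by
    intro y hy
    exact hsound (fun z => z ∈ S ++ e) (fun fd hfd hL => a4 fd hfd hL)
      (fun z hz => List.mem_append_left _ hz) y hy
  have hperm : (S ++ e).Perm
      (S ++ PySem.Set.diff C' (PySem.Set.ofList S)) := by
    refine List.Perm.append_left S ?_
    refine (List.perm_ext_iff_of_nodup a2 (PySem.Set.nodup_diff _ _ q2)).mpr ?_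
    intro y
    rw [PySem.Set.mem_diff, PySem.Set.mem_ofList]
    constructor
    · intro hy
      exact ⟨hresF y (List.mem_append_right _ hy), a3 y hy⟩
    · rintro ⟨hyF, hyS⟩
      rcases List.mem_append.mp (hFres y hyF) with h1 | h2
      · exact absurd h1 hyS
      · exact h2
  exact PySem.List.sorted_eq_sorted_of_perm _ _ _ (fun a b hab => hab) hperm

-- ===== the outer loop over the subsets =====

theorem foldl_or_eq_any (p : List String → Bool) : ∀ (keys : List (List String)) (b : Bool),
    keys.foldl (fun b key => if p key then true else b) b = (b || keys.any p) := by
  intro keys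
  induction keys with
  | nil => intro b; simp
  | cons k t ih =>
    intro b
    simp only [List.foldl_cons, List.any_cons]
    by_cases hp : p k = true
    · rw [if_pos hp, ih true, hp]
      simp
    · have hp' : p k = false := by simpa using hp
      rw [if_neg hp, ih b, hp']
      simp

theorem outer_eq (R : List String) (FD : List (List (List String))) :
    ∀ (L : List (List String)), (∀ s ∈ L, ∀ x ∈ s, x ∈ R) →
    ∀ (accR : List (List (List String))) (keys : List (List String))
      (skeys : List (PySem.Set String)),
    (∀ t ∈ skeys, ∃ k ∈ keys, ∀ x ∈ k, x ∈ t) →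
    (∀ k ∈ keys, PySem.Set.ofList k ∈ skeys) →
    (L.foldl
      (fun (acc : List (List (List String)) × List (List String)) att_set =>
        let att_closure := closureA R FD att_set
        if att_closure = R then
          let is_super := acc.2.foldl (fun b key => if is_subset key att_set then true else b) false
          if is_super then acc
          else (acc.1 ++ [[att_set, att_closure]], acc.2 ++ [att_set])
        else (acc.1 ++ [[att_set, att_closure]], acc.2)) (accR, keys)).1
    = (L.foldl
      (fun (acc : List (List (List String)) × List (PySem.Set String)) s =>
        let base := PySem.Set.ofList s
        let cur := altClose FD (altOccur FD) s
        let c := PySem.List.sorted (s ++ PySem.Set.diff cur base) (fun x => x) false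
        if c = R then
          let skip := acc.2.any (fun t => PySem.Set.issubset t base)
          if skip then (acc.1, acc.2 ++ [base])
          else (acc.1 ++ [[s, c]], acc.2 ++ [base])
        else (acc.1 ++ [[s, c]], acc.2)) (accR, skeys)).1 := by
  intro L
  induction L with
  | nil => intro _ accR keys skeys _ _; rfl
  | cons s t ih =>
    intro hL accR keys skeys hsk hks
    have hcs := closureB_eq R FD s (hL s List.mem_cons_self)
    simp only [List.foldl_cons, hcs]
    by_cases hR : PySem.List.sorted
        (s ++ PySem.Set.diff (altClose FD (altOccur FD) s) (PySem.Set.ofList s))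
        (fun x => x) false = R
    · rw [if_pos hR, if_pos hR]
      have hsup := foldl_or_eq_any (fun key => is_subset key s) keys false
      have hiff : (keys.any (fun key => is_subset key s) = true)
          ↔ (skeys.any (fun t => PySem.Set.issubset t (PySem.Set.ofList s)) = true) := by
        constructor
        · intro h
          obtain ⟨k, hk, hks2⟩ := List.any_eq_true.mp h
          refine List.any_eq_true.mpr ⟨PySem.Set.ofList k, hks k hk, ?_⟩
          refine (PySem.Set.issubset_iff _ _).mpr ?_
          intro x hx
          exact (PySem.Set.mem_ofList _ _).mpr
            ((is_subset_iff _ _).mp hks2 x ((PySem.Set.mem_ofList _ _).mp hx))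
        · intro h
          obtain ⟨tk, htk, hsub⟩ := List.any_eq_true.mp h
          obtain ⟨k, hk, hkt⟩ := hsk tk htk
          refine List.any_eq_true.mpr ⟨k, hk, ?_⟩
          refine (is_subset_iff _ _).mpr ?_
          intro x hx
          exact (PySem.Set.mem_ofList _ _).mp
            ((PySem.Set.issubset_iff _ _).mp hsub x (hkt x hx))
      have hbool : keys.any (fun key => is_subset key s)
          = skeys.any (fun tk => PySem.Set.issubset tk (PySem.Set.ofList s)) := by
        rw [Bool.eq_iff_iff]
        exact hiff
      rw [hsup, Bool.false_or, hbool]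
      by_cases hAny : (skeys.any (fun tk => PySem.Set.issubset tk (PySem.Set.ofList s))) = true
      · rw [if_pos hAny, if_pos hAny]
        refine ih (fun s' h => hL s' (List.mem_cons_of_mem _ h)) accR keys
          (skeys ++ [PySem.Set.ofList s]) ?_ ?_
        · intro tk htk
          rcases List.mem_append.mp htk with h1 | h2
          · exact hsk tk h1
          · rw [List.mem_singleton] at h2
            subst h2
            obtain ⟨tk', htk', hsub⟩ := List.any_eq_true.mp hAny
            obtain ⟨k, hk, hkt⟩ := hsk tk' htk'
            refine ⟨k, hk, ?_⟩
            intro x hx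
            exact (PySem.Set.issubset_iff _ _).mp hsub x (hkt x hx)
        · intro k hk
          exact List.mem_append_left _ (hks k hk)
      · rw [if_neg hAny, if_neg hAny]
        refine ih (fun s' h => hL s' (List.mem_cons_of_mem _ h)) _ (keys ++ [s])
          (skeys ++ [PySem.Set.ofList s]) ?_ ?_
        · intro tk htk
          rcases List.mem_append.mp htk with h1 | h2
          · obtain ⟨k, hk, hkt⟩ := hsk tk h1
            exact ⟨k, List.mem_append_left _ hk, hkt⟩
          · rw [List.mem_singleton] at h2
            subst h2
            exact ⟨s, List.mem_append_right _ List.mem_cons_self,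
              fun x hx => (PySem.Set.mem_ofList _ _).mpr hx⟩
        · intro k hk
          rcases List.mem_append.mp hk with h1 | h2
          · exact List.mem_append_left _ (hks k h1)
          · rw [List.mem_singleton] at h2
            subst h2
            exact List.mem_append_right _ List.mem_cons_self
    · rw [if_neg hR, if_neg hR]
      exact ih (fun s' h => hL s' (List.mem_cons_of_mem _ h)) _ keys skeys hsk hks

-- ===== VERDICT (by name: the statement is the Claim_ definition above) =====
theorem all_closures_spec : Claim_equal_all_closures := by
  intro R FD _ _
  show all_closures R FD = all_closures_alt R FD
  by_cases hR : R = []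
  · subst hR
    rfl
  · rw [show all_closures_alt R FD
        = ((PySem.List.sorted (PySem.List.sorted
              (PySem.List.slice (altSubsAll R) (some 1) none) (fun r => r) false)
            (fun r => r.length) false).foldl
            (fun (acc : List (List (List String)) × List (PySem.Set String)) s =>
              let base := PySem.Set.ofList s
              let cur := altClose FD (altOccur FD) s
              let c := PySem.List.sorted (s ++ PySem.Set.diff cur base) (fun x => x) false
              if c = R then
                let skip := acc.2.any (fun t => PySem.Set.issubset t base)
                if skip then (acc.1, acc.2 ++ [base])
                else (acc.1 ++ [[s, c]], acc.2 ++ [base])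
              else (acc.1 ++ [[s, c]], acc.2)) ([], [])).1 from by
      simp only [all_closures_alt, if_neg hR]]
    have hsubs : PySem.List.sorted (PySem.List.sorted
        (PySem.List.slice (altSubsAll R) (some 1) none) (fun r => r) false)
        (fun r => r.length) false = subsets R := by
      rw [subsB_eq, subs_eq]
    rw [hsubs]
    exact outer_eq R FD (subsets R) (subs_elem_mem R) [] [] []
      (fun t ht => absurd ht (List.not_mem_nil)) (fun k hk => absurd hk (List.not_mem_nil))
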